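-- pv_equiv track=rewrite | github.com/Kurokamori/Monsterify-Your-Website | website/linters/linter.py | _find_next_open_brace
-- ===== SOURCE A (Python) =====
-- def _skip_comment_forward(s: str, i: int) -> int:
--     end = s.find("*/", i + 2)
--     return len(s) if end == -1 else end + 2
--
-- def _skip_string_forward(s: str, i: int) -> int:
--     quote = s[i]
--     i += 1
--     while i < len(s):
--         c = s[i]
--         if c == "\\":
--             i += 2
--             continue
--         if c == quote:
--             return i + 1
--         i += 1
--     return i
--
-- def _find_next_open_brace(s: str, start: int) -> int:
--     """Find next '{' not in string/comment."""
--     i = start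
--     n = len(s)
--     while i < n:
--         c = s[i]
--         if c == "/" and i + 1 < n and s[i+1] == "*":
--             i = _skip_comment_forward(s, i)
--             continue
--         if c in ("'", '"'):
--             i = _skip_string_forward(s, i)
--             continue
--         if c == "{":
--             return i
--         i += 1
--     return -1
-- ===== SOURCE B (Python) =====
-- def _string_close(s: str, q: int) -> int:
--     """End index (one past the closing quote) of the string opened at q, via
--     quote-occurrence jumps + backslash-run parity instead of a char-by-char escape scan."""
--     quote = s[q]
--     p = s.find(quote, q + 1)
--     while p != -1:
--         k = p
--         while k > 0 and s[k - 1] == "\\":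
--             k -= 1
--         if (p - k) % 2 == 0:
--             return p + 1
--         p = s.find(quote, p + 1)
--     return len(s)
--
-- def _find_next_open_brace(s: str, start: int) -> int:
--     """Find next '{' not in string/comment, by jumping between pattern occurrences
--     located with str.find instead of examining every character."""
--     n = len(s)
--     i = start
--     while True:
--         b = s.find("{", i)
--         cm = s.find("/*", i)
--         q1 = s.find("'", i)
--         q2 = s.find('"', i)
--         q = q1 if (q2 == -1 or (q1 != -1 and q1 < q2)) else q2
--         if b != -1 and (cm == -1 or b < cm) and (q == -1 or b < q):
--             return b
--         if cm != -1 and (q == -1 or cm < q):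
--             e = s.find("*/", cm + 2)
--             i = n if e == -1 else e + 2
--         elif q != -1:
--             i = _string_close(s, q)
--         else:
--             return -1
-- ===== Notes on version B (the rewrite author's own statement) =====
-- stated objective: faster
-- what changed: A scans character by character in Python, dispatching into skip helpers; B never examines characters one at a time in its main loop: it jumps between occurrences of '{', '/*' and quotes located with C-level str.find, and closes a string by scanning successive quote occurrences with a backslash-run parity test instead of replaying the escape-skip walk.
-- outside the precondition, e.g. on _find_next_open_brace('{', -1): A returns -1, B returns 0
import Mathlib
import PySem

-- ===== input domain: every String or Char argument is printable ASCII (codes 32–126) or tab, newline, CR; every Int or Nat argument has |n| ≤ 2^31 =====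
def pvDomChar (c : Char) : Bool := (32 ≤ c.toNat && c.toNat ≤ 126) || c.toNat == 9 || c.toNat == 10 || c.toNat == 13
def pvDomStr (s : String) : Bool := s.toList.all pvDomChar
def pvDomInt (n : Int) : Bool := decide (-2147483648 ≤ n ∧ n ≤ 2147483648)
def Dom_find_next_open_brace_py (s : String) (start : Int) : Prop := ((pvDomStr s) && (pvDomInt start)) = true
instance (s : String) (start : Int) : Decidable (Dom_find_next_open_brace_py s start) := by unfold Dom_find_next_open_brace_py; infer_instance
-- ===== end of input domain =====

-- B replaces A's character-by-character scan by jumps between pattern occurrences located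
-- with str.find, and closes strings by a backslash-run parity test on successive quote
-- occurrences instead of replaying A's escape-skip walk; same asymptotic cost, different algorithm.
-- The Python while-loops are ported with a fuel argument as a totality guard only: each
-- iteration strictly advances, so the fuel never runs out on the admitted inputs.

-- ===== PORT A =====
-- _skip_comment_forward: end = s.find("*/", i+2); len(s) if end == -1 else end+2
def pvA_skipComment (cs : List Char) (i : Int) : Int :=
  let e := PySem.Chars.findFrom cs ['*', '/'] (i + 2) none
  if e = -1 then (cs.length : Int) else e + 2

-- the while-loop of _skip_string_forward (after quote = s[i]; i += 1)
def pvA_skipStringLoop (cs : List Char) (quote : Char) (i : Int) : Nat → Int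
  | 0 => i
  | fuel + 1 =>
    if i < (cs.length : Int) then
      if PySem.List.pyGetD cs i ' ' = '\\' then pvA_skipStringLoop cs quote (i + 2) fuel
      else if PySem.List.pyGetD cs i ' ' = quote then i + 1
      else pvA_skipStringLoop cs quote (i + 1) fuel
    else i

-- _skip_string_forward (quote = s[i] is in range at every call site admitted by Pre_)
def pvA_skipString (cs : List Char) (i : Int) : Int :=
  pvA_skipStringLoop cs (PySem.List.pyGetD cs i ' ') (i + 1) (cs.length + 1)

-- the while-loop of _find_next_open_brace
def pvA_loop (cs : List Char) (i : Int) : Nat → Int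
  | 0 => -1
  | fuel + 1 =>
    if i < (cs.length : Int) then
      if PySem.List.pyGetD cs i ' ' = '/' ∧ i + 1 < (cs.length : Int) ∧
          PySem.List.pyGetD cs (i + 1) ' ' = '*' then
        pvA_loop cs (pvA_skipComment cs i) fuel
      else if PySem.List.pyGetD cs i ' ' = '\'' ∨ PySem.List.pyGetD cs i ' ' = '"' then
        pvA_loop cs (pvA_skipString cs i) fuel
      else if PySem.List.pyGetD cs i ' ' = '{' then i
      else pvA_loop cs (i + 1) fuel
    else -1

def find_next_open_brace_py (s : String) (start : Int) : Int :=
  pvA_loop s.toList start (s.toList.length + 1)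

-- ===== PORT B =====
-- inner while of _string_close: k = p; while k > 0 and s[k-1] == '\\': k -= 1
def pvB_runStart (cs : List Char) : Nat → Nat
  | 0 => 0
  | k + 1 => if PySem.List.pyGetD cs (k : Int) ' ' = '\\' then pvB_runStart cs k else k + 1

-- outer while of _string_close: successive finds of the quote, parity test on the backslash run
def pvB_stringCloseLoop (cs : List Char) (quote : Char) (p : Int) : Nat → Int
  | 0 => (cs.length : Int)
  | fuel + 1 =>
    if p ≠ -1 then
      if (p.toNat - pvB_runStart cs p.toNat) % 2 = 0 then p + 1
      else pvB_stringCloseLoop cs quote (PySem.Chars.findFrom cs [quote] (p + 1) none) fuel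
    else (cs.length : Int)

-- _string_close(s, q)
def pvB_stringClose (cs : List Char) (q : Int) : Int :=
  pvB_stringCloseLoop cs (PySem.List.pyGetD cs q ' ')
    (PySem.Chars.findFrom cs [PySem.List.pyGetD cs q ' '] (q + 1) none) (cs.length + 1)

-- the while True loop of _find_next_open_brace: jump between find() results
def pvB_loop (cs : List Char) (i : Int) : Nat → Int
  | 0 => -1
  | fuel + 1 =>
    let b := PySem.Chars.findFrom cs ['{'] i none
    let cm := PySem.Chars.findFrom cs ['/', '*'] i none
    let q1 := PySem.Chars.findFrom cs ['\''] i none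
    let q2 := PySem.Chars.findFrom cs ['"'] i none
    let q := if q2 = -1 ∨ (q1 ≠ -1 ∧ q1 < q2) then q1 else q2
    if b ≠ -1 ∧ (cm = -1 ∨ b < cm) ∧ (q = -1 ∨ b < q) then b
    else if cm ≠ -1 ∧ (q = -1 ∨ cm < q) then
      let e := PySem.Chars.findFrom cs ['*', '/'] (cm + 2) none
      pvB_loop cs (if e = -1 then (cs.length : Int) else e + 2) fuel
    else if q ≠ -1 then pvB_loop cs (pvB_stringClose cs q) fuel
    else -1

def find_next_open_brace_py_alt (s : String) (start : Int) : Int :=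
  pvB_loop s.toList start (s.toList.length + 2)

-- ===== PRECONDITION & SPEC =====
-- Pre_ excludes negative start, on which A raises IndexError when start < -len(s) and otherwise
-- relies on Python's accidental negative-index wraparound (possibly returning a negative
-- "found" index such as -1) — a corner no caller would specify.
def Pre_find_next_open_brace_py (s : String) (start : Int) : Prop := 0 ≤ start
instance (s : String) (start : Int) : Decidable (Pre_find_next_open_brace_py s start) := by
  unfold Pre_find_next_open_brace_py; infer_instance

def pvWitness_find_next_open_brace_py : String × Int := ("a{", 0)

def Spec_find_next_open_brace_py (s : String) (start : Int) (out : Int) : Prop :=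
  out = find_next_open_brace_py_alt s start
instance (s : String) (start : Int) (out : Int) : Decidable (Spec_find_next_open_brace_py s start out) := by
  unfold Spec_find_next_open_brace_py; infer_instance

-- ===== CLAIM (what is proved, stated in full; the proofs are below) =====
def Claim_equal_find_next_open_brace_py : Prop := ∀ (s : String) (start : Int), Dom_find_next_open_brace_py s start → Pre_find_next_open_brace_py s start → Spec_find_next_open_brace_py s start (find_next_open_brace_py s start)

-- ===== LEMMAS AND PROOFS =====

-- occurrence of a 1- resp. 2-character pattern at a position
theorem pv_prefix1_iff (cs : List Char) (c : Char) (k : Nat) :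
    [c] <+: cs.drop k ↔ (k < cs.length ∧ cs[k]? = some c) := by
  constructor
  · intro hp
    have hlen : 1 ≤ (cs.drop k).length := hp.length_le
    simp only [List.length_drop] at hlen
    have hk : k < cs.length := by omega
    rw [List.drop_eq_getElem_cons hk, List.cons_prefix_cons] at hp
    exact ⟨hk, by simp [List.getElem?_eq_getElem hk, hp.1.symm]⟩
  · rintro ⟨hk, h1⟩
    rw [List.getElem?_eq_getElem hk] at h1
    rw [List.drop_eq_getElem_cons hk, List.cons_prefix_cons]
    exact ⟨by simpa using h1.symm, List.nil_prefix⟩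

theorem pv_prefix2_iff (cs : List Char) (c d : Char) (k : Nat) :
    [c, d] <+: cs.drop k ↔
      (k < cs.length ∧ cs[k]? = some c ∧ (k + 1) < cs.length ∧ cs[k + 1]? = some d) := by
  constructor
  · intro hp
    have hlen : 2 ≤ (cs.drop k).length := hp.length_le
    simp only [List.length_drop] at hlen
    have hk : k < cs.length := by omega
    have hk1 : k + 1 < cs.length := by omega
    rw [List.drop_eq_getElem_cons hk, List.drop_eq_getElem_cons hk1] at hp
    rw [List.cons_prefix_cons] at hp
    rw [List.cons_prefix_cons] at hp
    refine ⟨hk, ?_, hk1, ?_⟩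
    · simp [List.getElem?_eq_getElem hk, hp.1.symm]
    · simp [List.getElem?_eq_getElem hk1, hp.2.1.symm]
  · rintro ⟨hk, h1, hk1, h2⟩
    rw [List.getElem?_eq_getElem hk] at h1
    rw [List.getElem?_eq_getElem hk1] at h2
    rw [List.drop_eq_getElem_cons hk, List.drop_eq_getElem_cons hk1]
    rw [List.cons_prefix_cons, List.cons_prefix_cons]
    exact ⟨by simpa using h1.symm, by simpa using h2.symm, List.nil_prefix⟩

theorem pv_find_nonneg_of_ne (s' sub : List Char) (h : PySem.Chars.find s' sub ≠ -1) :
    0 ≤ PySem.Chars.find s' sub := by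
  have := PySem.Chars.neg_one_le_find s' sub
  omega

theorem pv_findFrom_nonneg (cs sub : List Char) (st : Int)
    (h : PySem.Chars.findFrom cs sub st none ≠ -1) :
    0 ≤ PySem.Chars.findFrom cs sub st none := by
  simp only [PySem.Chars.findFrom] at h ⊢
  split_ifs at h ⊢ <;>
    first
    | omega
    | exact add_nonneg (by omega) (pv_find_nonneg_of_ne _ _ (by assumption))

theorem pv_findFrom_past (cs sub : List Char) (hsub : sub ≠ []) (j : Int)
    (hj : (cs.length : Int) ≤ j) :
    PySem.Chars.findFrom cs sub j none = -1 := by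
  rcases eq_or_lt_of_le hj with hq | hq
  · have : j = ((cs.length : Nat) : Int) := hq.symm
    rw [this, PySem.Chars.findFrom_natCast cs sub cs.length le_rfl]
    simp [PySem.Chars.find_eq_neg_one_iff, List.infix_nil, hsub]
  · simp only [PySem.Chars.findFrom]
    split_ifs with h1 h2 h3 <;> omega

theorem pv_findFrom_here (cs sub : List Char) (k : Nat) (hk : k < cs.length)
    (hp : sub <+: cs.drop k) :
    PySem.Chars.findFrom cs sub (k : Int) none = (k : Int) := by
  rw [PySem.Chars.findFrom_natCast cs sub k hk.le]
  have hinf : sub <:+: cs.drop k := hp.isInfix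
  have hnn : 0 ≤ PySem.Chars.find (cs.drop k) sub :=
    (PySem.Chars.find_nonneg_iff _ _).mpr hinf
  have hspec := PySem.Chars.find_spec hnn
  have hzero : PySem.Chars.find (cs.drop k) sub = 0 := by
    by_contra hne
    have hpos : 0 < (PySem.Chars.find (cs.drop k) sub).toNat := by omega
    exact (hspec.2 0 hpos) (by simpa using hp)
  simp [hzero]

theorem pv_findFrom_succ (cs sub : List Char) (k : Nat) (hk : k < cs.length)
    (hnp : ¬ sub <+: cs.drop k) :
    PySem.Chars.findFrom cs sub (k : Int) none
      = PySem.Chars.findFrom cs sub ((k + 1 : Nat) : Int) none := by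
  by_cases ha : PySem.Chars.findFrom cs sub (k : Int) none = -1
  · rw [ha, eq_comm]
    rw [PySem.Chars.findFrom_natCast_eq_neg_one_iff cs sub k hk.le] at ha
    rw [PySem.Chars.findFrom_natCast_eq_neg_one_iff cs sub (k + 1) (by omega)]
    intro hcon
    apply ha
    have hsx : cs.drop (k + 1) = (cs.drop k).drop 1 := (List.drop_drop (l := cs)).symm
    exact hcon.trans ((hsx ▸ List.drop_suffix 1 (cs.drop k)).isInfix)
  · have hspec := PySem.Chars.findFrom_natCast_spec cs sub k hk.le ha
    set a := PySem.Chars.findFrom cs sub ((k : Nat) : Int) none with hadef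
    have ha0 : 0 ≤ a := by have := hspec.1; omega
    have hane : a.toNat ≠ k := by
      intro hEq
      exact hnp (hEq ▸ hspec.2.1)
    have hage : k + 1 ≤ a.toNat := by have := hspec.1; omega
    have hb : PySem.Chars.findFrom cs sub ((k + 1 : Nat) : Int) none ≠ -1 := by
      intro hEq
      rw [PySem.Chars.findFrom_natCast_eq_neg_one_iff cs sub (k + 1) (by omega)] at hEq
      apply hEq
      have hdec : cs.drop a.toNat = (cs.drop (k + 1)).drop (a.toNat - (k + 1)) := by
        rw [List.drop_drop]; congr 1; omega
      exact ((hdec ▸ hspec.2.1).isInfix).trans (List.drop_suffix _ _).isInfix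
    have hbspec := PySem.Chars.findFrom_natCast_spec cs sub (k + 1) (by omega) hb
    set b := PySem.Chars.findFrom cs sub ((k + 1 : Nat) : Int) none with hbdef
    have hb0 : 0 ≤ b := by have := hbspec.1; omega
    have h1 : ¬ b.toNat < a.toNat := fun hlt =>
      (hspec.2.2 b.toNat (by have := hbspec.1; omega) hlt) hbspec.2.1
    have h2 : ¬ a.toNat < b.toNat := fun hlt =>
      (hbspec.2.2 a.toNat hage hlt) hspec.2.1
    omega

-- no occurrence at k: the find result is -1 or strictly beyond k
theorem pv_findFrom_gt (cs sub : List Char) (k : Nat) (hk : k < cs.length)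
    (hnp : ¬ sub <+: cs.drop k) :
    PySem.Chars.findFrom cs sub (k : Int) none = -1 ∨
      (k : Int) < PySem.Chars.findFrom cs sub (k : Int) none := by
  by_cases ha : PySem.Chars.findFrom cs sub (k : Int) none = -1
  · exact Or.inl ha
  · have hspec := PySem.Chars.findFrom_natCast_spec cs sub k hk.le ha
    right
    have : (PySem.Chars.findFrom cs sub (k : Int) none).toNat ≠ k := fun hEq =>
      hnp (hEq ▸ hspec.2.1)
    omega

theorem pvA_out (cs : List Char) : ∀ (f : Nat) (i : Int), (cs.length : Int) ≤ i →
    pvA_loop cs i f = -1 := by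
  intro f i hi
  cases f with
  | zero => rfl
  | succ f => simp only [pvA_loop]; rw [if_neg (by omega)]

theorem pvB_out (cs : List Char) : ∀ (g : Nat) (i : Int), (cs.length : Int) ≤ i →
    pvB_loop cs i g = -1 := by
  intro g i hi
  cases g with
  | zero => rfl
  | succ g =>
    simp only [pvB_loop]
    rw [pv_findFrom_past cs ['{'] (by simp) i hi,
        pv_findFrom_past cs ['/', '*'] (by simp) i hi,
        pv_findFrom_past cs ['\''] (by simp) i hi,
        pv_findFrom_past cs ['"'] (by simp) i hi]
    simp

theorem pvA_skipComment_gt (cs : List Char) (i : Int)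
    (h1 : i < (cs.length : Int)) (h2 : i + 1 < (cs.length : Int)) :
    i < pvA_skipComment cs i := by
  have hres : pvA_skipComment cs i =
      (if PySem.Chars.findFrom cs ['*', '/'] (i + 2) none = -1 then (cs.length : Int)
       else PySem.Chars.findFrom cs ['*', '/'] (i + 2) none + 2) := rfl
  rw [hres]
  by_cases he : PySem.Chars.findFrom cs ['*', '/'] (i + 2) none = -1
  · rw [if_pos he]; omega
  · rw [if_neg he]
    by_cases hi : 0 ≤ i
    · have hcast : (i + 2 : Int) = ((i.toNat + 2 : Nat) : Int) := by omega
      have hk : i.toNat + 2 ≤ cs.length := by omega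
      rw [hcast] at he ⊢
      have hsp := (PySem.Chars.findFrom_natCast_spec cs ['*', '/'] (i.toNat + 2) hk he).1
      omega
    · have hnn := pv_findFrom_nonneg cs ['*', '/'] (i + 2) he
      omega

-- start of the maximal backslash run ending just before position k
theorem pvRS_le (cs : List Char) : ∀ k, pvB_runStart cs k ≤ k := by
  intro k
  induction k with
  | zero => simp [pvB_runStart]
  | succ k ih =>
    simp only [pvB_runStart]
    split_ifs <;> omega

theorem pvRS_succ (cs : List Char) (k : Nat) :
    pvB_runStart cs (k + 1)
      = if PySem.List.pyGetD cs (k : Int) ' ' = '\\' then pvB_runStart cs k else k + 1 := rfl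

-- reference: first closing position of a string (first quote with an even backslash run), +1;
-- cs.length if the string is unterminated
def pvCS (cs : List Char) (quote : Char) (j : Nat) : Int :=
  if h : j < cs.length then
    if cs[j] = quote ∧ (j - pvB_runStart cs j) % 2 = 0 then ((j : Int) + 1)
    else pvCS cs quote (j + 1)
  else (cs.length : Int)
termination_by cs.length - j

theorem pvCS_out (cs : List Char) (quote : Char) (j : Nat) (hj : ¬ j < cs.length) :
    pvCS cs quote j = (cs.length : Int) := by
  rw [pvCS, dif_neg hj]

theorem pvCS_bounds (cs : List Char) (quote : Char) :
    ∀ (k j : Nat), cs.length - j = k → j ≤ cs.length →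
      (j : Int) ≤ pvCS cs quote j ∧ pvCS cs quote j ≤ (cs.length : Int) := by
  intro k
  induction k using Nat.strong_induction_on with
  | _ k ih =>
  intro j hk hj
  rw [pvCS]
  by_cases h : j < cs.length
  · rw [dif_pos h]
    by_cases hc : cs[j] = quote ∧ (j - pvB_runStart cs j) % 2 = 0
    · rw [if_pos hc]; omega
    · rw [if_neg hc]
      have := ih (cs.length - (j + 1)) (by omega) (j + 1) rfl (by omega)
      omega
  · rw [dif_neg h]; omega

theorem pvGet (cs : List Char) (j : Nat) (hj : j < cs.length) :
    PySem.List.pyGetD cs (j : Int) ' ' = cs[j] := by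
  rw [PySem.List.pyGetD_eq_getElem cs ' ' (by positivity)
      (show (j : Int) < (cs.length : Int) by exact_mod_cast hj)]
  simp

-- A's escape-skip scan, started at an even-parity position, lands exactly where the
-- parity rule pvCS says the string closes (or both run off the end)
theorem pvSA (cs : List Char) (quote : Char) (hq : quote ≠ '\\') :
    ∀ (f : Nat) (j : Nat), cs.length - j < f → (j - pvB_runStart cs j) % 2 = 0 →
      pvA_skipStringLoop cs quote (j : Int) f = pvCS cs quote j ∨
      ((cs.length : Int) ≤ pvA_skipStringLoop cs quote (j : Int) f ∧
        pvCS cs quote j = (cs.length : Int)) := by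
  intro f
  induction f with
  | zero => intro j h; omega
  | succ f ih =>
    intro j hf hal
    by_cases hj : j < cs.length
    · have hjlt : (j : Int) < (cs.length : Int) := by exact_mod_cast hj
      have e0 := pvGet cs j hj
      simp only [pvA_skipStringLoop]
      rw [if_pos hjlt]
      by_cases hbs : cs[j] = '\\'
      · -- backslash: skip two; alignment is preserved
        rw [if_pos (e0.trans (by rw [hbs]))]
        have hc2 : ((j : Int) + 2) = ((j + 2 : Nat) : Int) := by push_cast; ring
        have hrs1 : pvB_runStart cs (j + 1) = pvB_runStart cs j := by
          rw [pvRS_succ, if_pos (e0.trans (by rw [hbs]))]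
        have hrs2 : pvB_runStart cs (j + 2)
            = if PySem.List.pyGetD cs ((j + 1 : Nat) : Int) ' ' = '\\'
              then pvB_runStart cs (j + 1) else j + 2 := pvRS_succ cs (j + 1)
        have hle := pvRS_le cs j
        have hal2 : ((j + 2) - pvB_runStart cs (j + 2)) % 2 = 0 := by
          rw [hrs2]
          split_ifs with h1
          · rw [hrs1]; omega
          · omega
        have hcs2 : pvCS cs quote j = pvCS cs quote (j + 2) := by
          have s1 : pvCS cs quote j = pvCS cs quote (j + 1) := by
            rw [pvCS, dif_pos hj, if_neg (by intro hc; exact hq (hbs ▸ hc.1).symm)]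
          rw [s1]
          by_cases hj1 : j + 1 < cs.length
          · rw [pvCS, dif_pos hj1]
            by_cases hqq : cs[j + 1] = quote
            · rw [if_neg (by
                intro hc
                rw [hrs1] at hc
                omega)]
            · rw [if_neg (by intro hc; exact hqq hc.1)]
          · rw [pvCS_out cs quote (j + 1) hj1, pvCS_out cs quote (j + 2) (by omega)]
        rw [hc2, hcs2]
        exact ih (j + 2) (by omega) hal2
      · rw [if_neg (by rw [e0]; intro hc; exact hbs hc)]
        by_cases hqt : cs[j] = quote
        · -- closing quote at an even-parity position
          rw [if_pos (e0.trans (by rw [hqt]))]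
          left
          rw [pvCS, dif_pos hj, if_pos ⟨hqt, hal⟩]
        · rw [if_neg (by rw [e0]; intro hc; exact hqt hc)]
          have hc1 : ((j : Int) + 1) = ((j + 1 : Nat) : Int) := by push_cast; ring
          have hal1 : ((j + 1) - pvB_runStart cs (j + 1)) % 2 = 0 := by
            rw [pvRS_succ, if_neg (by rw [pvGet cs j hj]; intro hc; exact hbs hc)]
            omega
          have hcs1 : pvCS cs quote j = pvCS cs quote (j + 1) := by
            rw [pvCS, dif_pos hj, if_neg (by intro hc; exact hqt hc.1)]
          rw [hc1, hcs1]
          exact ih (j + 1) (by omega) hal1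
    · have hjge : ¬ ((j : Int) < (cs.length : Int)) := by exact_mod_cast hj
      simp only [pvA_skipStringLoop]
      rw [if_neg hjge]
      right
      exact ⟨by omega, pvCS_out cs quote j hj⟩

theorem pv_occ_infix (cs sub : List Char) (t x : Nat) (htx : t ≤ x)
    (hp : sub <+: cs.drop x) : sub <:+: cs.drop t := by
  have hdec : cs.drop x = (cs.drop t).drop (x - t) := by
    rw [List.drop_drop]; congr 1; omega
  exact ((hdec ▸ hp).isInfix).trans (List.drop_suffix _ _).isInfix

theorem pvCS_skip (cs : List Char) (quote : Char) :
    ∀ (d : Nat) (j m : Nat), m - j = d → j ≤ m →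
      (∀ x, j ≤ x → x < m → ¬ [quote] <+: cs.drop x) →
      pvCS cs quote j = pvCS cs quote m := by
  intro d
  induction d with
  | zero => intro j m hd hjm _; have : j = m := by omega
            rw [this]
  | succ d ih =>
    intro j m hd hjm hno
    by_cases hj : j < cs.length
    · have s1 : pvCS cs quote j = pvCS cs quote (j + 1) := by
        rw [pvCS, dif_pos hj]
        rw [if_neg (by
          intro hc
          exact hno j le_rfl (by omega)
            ((pv_prefix1_iff cs quote j).mpr ⟨hj, by simp [List.getElem?_eq_getElem hj, hc.1]⟩))]
      rw [s1]
      exact ih (j + 1) m (by omega) (by omega) (fun x hx1 hx2 => hno x (by omega) hx2)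
    · rw [pvCS_out cs quote j hj, pvCS_out cs quote m (by omega)]

-- B's quote-occurrence jumping computes pvCS
theorem pvSB (cs : List Char) (quote : Char) :
    ∀ (f : Nat) (t : Nat), cs.length - t < f → t ≤ cs.length →
      pvB_stringCloseLoop cs quote (PySem.Chars.findFrom cs [quote] (t : Int) none) f
        = pvCS cs quote t := by
  intro f
  induction f with
  | zero => intro t h; omega
  | succ f ih =>
    intro t hf ht
    by_cases hp : PySem.Chars.findFrom cs [quote] (t : Int) none = -1
    · simp only [pvB_stringCloseLoop]
      rw [if_neg (by simp [hp])]
      rw [PySem.Chars.findFrom_natCast_eq_neg_one_iff cs [quote] t ht] at hp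
      rw [eq_comm]
      by_cases h : t ≤ cs.length
      · rw [pvCS_skip cs quote (cs.length - t) t cs.length rfl h
          (fun x hx1 hx2 => fun hc => hp (pv_occ_infix cs [quote] t x hx1 hc))]
        exact pvCS_out cs quote cs.length (by omega)
      · exact pvCS_out cs quote t (by omega)
    · have hspec := PySem.Chars.findFrom_natCast_spec cs [quote] t ht hp
      set p := PySem.Chars.findFrom cs [quote] (t : Int) none with hpdef
      have hp0 : 0 ≤ p := by have := hspec.1; omega
      have hocc := (pv_prefix1_iff cs quote p.toNat).mp hspec.2.1
      have hpn : p.toNat < cs.length := hocc.1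
      have hcq : cs[p.toNat] = quote := by
        have := hocc.2
        rw [List.getElem?_eq_getElem hpn] at this
        exact Option.some.inj this
      have htp : t ≤ p.toNat := by have := hspec.1; omega
      have hcsskip : pvCS cs quote t = pvCS cs quote p.toNat :=
        pvCS_skip cs quote (p.toNat - t) t p.toNat rfl htp
          (fun x hx1 hx2 => hspec.2.2 x hx1 hx2)
      simp only [pvB_stringCloseLoop]
      rw [if_pos (by simp [hp])]
      by_cases hpar : (p.toNat - pvB_runStart cs p.toNat) % 2 = 0
      · rw [if_pos hpar, hcsskip, pvCS, dif_pos hpn, if_pos ⟨hcq, hpar⟩]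
        omega
      · rw [if_neg hpar, hcsskip]
        have hstep : pvCS cs quote p.toNat = pvCS cs quote (p.toNat + 1) := by
          rw [pvCS, dif_pos hpn, if_neg (by intro hc; exact hpar hc.2)]
        have hc1 : (p + 1 : Int) = ((p.toNat + 1 : Nat) : Int) := by omega
        rw [hstep, hc1]
        exact ih (p.toNat + 1) (by omega) (by omega)

-- A's string skip and B's string close agree, or both report an unterminated string
theorem pvSTR (cs : List Char) (m : Nat) (hm : m < cs.length)
    (hq : cs[m] = '\'' ∨ cs[m] = '"') :
    (pvA_skipString cs (m : Int) = pvB_stringClose cs (m : Int) ∧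
      (m : Int) < pvB_stringClose cs (m : Int) ∧
      pvB_stringClose cs (m : Int) ≤ (cs.length : Int)) ∨
    ((cs.length : Int) ≤ pvA_skipString cs (m : Int) ∧
      pvB_stringClose cs (m : Int) = (cs.length : Int)) := by
  have e0 := pvGet cs m hm
  have hqne : cs[m] ≠ '\\' := by rcases hq with h | h <;> rw [h] <;> decide
  have hc1 : ((m : Int) + 1) = ((m + 1 : Nat) : Int) := by push_cast; ring
  have hB : pvB_stringClose cs (m : Int) = pvCS cs (cs[m]) (m + 1) := by
    unfold pvB_stringClose
    rw [e0, hc1]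
    exact pvSB cs (cs[m]) (cs.length + 1) (m + 1) (by omega) (by omega)
  have hal : ((m + 1) - pvB_runStart cs (m + 1)) % 2 = 0 := by
    rw [pvRS_succ, if_neg (by rw [e0]; exact hqne)]
    omega
  have hA : pvA_skipString cs (m : Int)
      = pvA_skipStringLoop cs (cs[m]) ((m + 1 : Nat) : Int) (cs.length + 1) := by
    unfold pvA_skipString
    rw [e0, hc1]
  have hquote_ne : cs[m] ≠ '\\' := hqne
  rcases pvSA cs (cs[m]) hquote_ne (cs.length + 1) (m + 1) (by omega) hal with h | h
  · left
    refine ⟨by rw [hA, hB, h], ?_, ?_⟩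
    · rw [hB]
      have := pvCS_bounds cs (cs[m]) (cs.length - (m + 1)) (m + 1) rfl (by omega)
      omega
    · rw [hB]
      have := pvCS_bounds cs (cs[m]) (cs.length - (m + 1)) (m + 1) rfl (by omega)
      omega
  · right
    exact ⟨by rw [hA]; exact h.1, by rw [hB]; exact h.2⟩

theorem pv_no1 (cs : List Char) (m : Nat) (hm : m < cs.length) (c : Char)
    (hne : cs[m] ≠ c) : ¬ [c] <+: cs.drop m := by
  rw [pv_prefix1_iff]
  rintro ⟨_, hx⟩
  rw [List.getElem?_eq_getElem hm] at hx
  exact hne (Option.some.inj hx)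

theorem pv_yes1 (cs : List Char) (m : Nat) (hm : m < cs.length) (c : Char)
    (heq : cs[m] = c) :
    PySem.Chars.findFrom cs [c] (m : Int) none = (m : Int) :=
  pv_findFrom_here cs [c] m hm
    ((pv_prefix1_iff cs c m).mpr ⟨hm, by rw [List.getElem?_eq_getElem hm, heq]⟩)

-- A's comment branch condition says exactly that "/*" occurs at m
theorem pvAcond (cs : List Char) (m : Nat) (hm : m < cs.length) :
    (PySem.List.pyGetD cs (m : Int) ' ' = '/' ∧ (m : Int) + 1 < (cs.length : Int) ∧
        PySem.List.pyGetD cs ((m : Int) + 1) ' ' = '*')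
      ↔ ['/', '*'] <+: cs.drop m := by
  rw [pv_prefix2_iff]
  have hc1 : ((m : Int) + 1) = ((m + 1 : Nat) : Int) := by push_cast; ring
  constructor
  · rintro ⟨a, b, c⟩
    have hm1 : m + 1 < cs.length := by omega
    refine ⟨hm, ?_, hm1, ?_⟩
    · rw [List.getElem?_eq_getElem hm, ← pvGet cs m hm, a]
    · rw [List.getElem?_eq_getElem hm1, ← pvGet cs (m + 1) hm1, ← hc1, c]
  · rintro ⟨_, g1, hm1, g2⟩
    rw [List.getElem?_eq_getElem hm] at g1
    rw [List.getElem?_eq_getElem hm1] at g2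
    refine ⟨by rw [pvGet cs m hm]; exact Option.some.inj g1, by omega, ?_⟩
    rw [hc1, pvGet cs (m + 1) hm1]
    exact Option.some.inj g2

-- at a position where none of the four patterns occurs, B's find results do not move
theorem pvB_shift (cs : List Char) (m : Nat) (hm : m < cs.length)
    (h1 : ¬ ['{'] <+: cs.drop m) (h2 : ¬ ['/', '*'] <+: cs.drop m)
    (h3 : ¬ ['\''] <+: cs.drop m) (h4 : ¬ ['"'] <+: cs.drop m) (g : Nat) :
    pvB_loop cs (m : Int) (g + 1) = pvB_loop cs ((m + 1 : Nat) : Int) (g + 1) := by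
  simp only [pvB_loop]
  rw [pv_findFrom_succ cs ['{'] m hm h1, pv_findFrom_succ cs ['/', '*'] m hm h2,
      pv_findFrom_succ cs ['\''] m hm h3, pv_findFrom_succ cs ['"'] m hm h4]

-- the two main loops agree at every non-negative position, for any sufficient fuel
theorem pvMain (cs : List Char) :
    ∀ (f : Nat), ∀ (m : Nat) (g : Nat), cs.length - m < f → cs.length - m < g →
      pvA_loop cs (m : Int) f = pvB_loop cs (m : Int) g := by
  intro f
  induction f with
  | zero => intro m g h _; omega
  | succ f ih =>
    intro m g hf hg
    obtain ⟨g', rfl⟩ : ∃ g', g = g' + 1 := ⟨g - 1, by omega⟩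
    by_cases hm : m < cs.length
    · have hjlt : (m : Int) < (cs.length : Int) := by exact_mod_cast hm
      have e0 := pvGet cs m hm
      by_cases hcom : ['/', '*'] <+: cs.drop m
      · -- a comment opens at m
        have hslash : cs[m] = '/' := by
          obtain ⟨_, hx, _, _⟩ := (pv_prefix2_iff cs '/' '*' m).mp hcom
          rw [List.getElem?_eq_getElem hm] at hx
          exact Option.some.inj hx
        have hm1 : m + 1 < cs.length := ((pv_prefix2_iff cs '/' '*' m).mp hcom).2.2.1
        conv_lhs => rw [pvA_loop]
        rw [if_pos hjlt, if_pos ((pvAcond cs m hm).mpr hcom)]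
        conv_rhs => rw [pvB_loop]
        set b := PySem.Chars.findFrom cs ['{'] (m : Int) none with hbdef
        set cm := PySem.Chars.findFrom cs ['/', '*'] (m : Int) none with hcmdef
        set q1 := PySem.Chars.findFrom cs ['\''] (m : Int) none with hq1def
        set q2 := PySem.Chars.findFrom cs ['"'] (m : Int) none with hq2def
        have hcm : cm = (m : Int) := pv_findFrom_here cs ['/', '*'] m hm hcom
        have hbgt : b = -1 ∨ (m : Int) < b :=
          pv_findFrom_gt cs ['{'] m hm (pv_no1 cs m hm '{' (by rw [hslash]; decide))
        have hq1gt : q1 = -1 ∨ (m : Int) < q1 :=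
          pv_findFrom_gt cs ['\''] m hm (pv_no1 cs m hm '\'' (by rw [hslash]; decide))
        have hq2gt : q2 = -1 ∨ (m : Int) < q2 :=
          pv_findFrom_gt cs ['"'] m hm (pv_no1 cs m hm '"' (by rw [hslash]; decide))
        have hqsel : (if q2 = -1 ∨ (q1 ≠ -1 ∧ q1 < q2) then q1 else q2) = -1 ∨
            (m : Int) < (if q2 = -1 ∨ (q1 ≠ -1 ∧ q1 < q2) then q1 else q2) := by
          split_ifs <;> tauto
        rw [if_neg (by
          rintro ⟨hb1, hb2, -⟩
          rw [hcm] at hb2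
          rcases hbgt with h | h
          · exact hb1 h
          · rcases hb2 with h2 | h2 <;> omega)]
        rw [if_pos (by
          refine ⟨by rw [hcm]; omega, ?_⟩
          rcases hqsel with h | h
          · exact Or.inl h
          · exact Or.inr (by rw [hcm]; exact h))]
        rw [hcm]
        have hsk : pvA_skipComment cs (m : Int) =
            (if PySem.Chars.findFrom cs ['*', '/'] ((m : Int) + 2) none = -1
             then (cs.length : Int)
             else PySem.Chars.findFrom cs ['*', '/'] ((m : Int) + 2) none + 2) := rfl
        show pvA_loop cs (pvA_skipComment cs (m : Int)) f =
          pvB_loop cs (if PySem.Chars.findFrom cs ['*', '/'] ((m : Int) + 2) none = -1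
            then (cs.length : Int)
            else PySem.Chars.findFrom cs ['*', '/'] ((m : Int) + 2) none + 2) g'
        rw [← hsk]
        have hgt := pvA_skipComment_gt cs (m : Int) hjlt (by exact_mod_cast hm1)
        have hub : pvA_skipComment cs (m : Int) ≤ (cs.length : Int) := by
          rw [hsk]
          by_cases he : PySem.Chars.findFrom cs ['*', '/'] ((m : Int) + 2) none = -1
          · rw [if_pos he]
          · rw [if_neg he]
            have hc2 : ((m : Int) + 2) = ((m + 2 : Nat) : Int) := by push_cast; ring
            rw [hc2] at he ⊢
            have hsp := PySem.Chars.findFrom_natCast_spec cs ['*', '/'] (m + 2)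
              (by omega) he
            have hocc := (pv_prefix2_iff cs '*' '/'
              (PySem.Chars.findFrom cs ['*', '/'] ((m + 2 : Nat) : Int) none).toNat).mp
              hsp.2.1
            omega
        set i' := pvA_skipComment cs (m : Int) with hi'
        have hi0 : i' = ((i'.toNat : Nat) : Int) := by omega
        rw [hi0]
        exact ih i'.toNat g' (by omega) (by omega)
      · by_cases hqt : cs[m] = '\'' ∨ cs[m] = '"'
        · -- a string opens at m
          conv_lhs => rw [pvA_loop]
          rw [if_pos hjlt, if_neg (fun hAcc => hcom ((pvAcond cs m hm).mp hAcc)),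
              if_pos (by rw [e0]; exact hqt)]
          conv_rhs => rw [pvB_loop]
          set b := PySem.Chars.findFrom cs ['{'] (m : Int) none with hbdef
          set cm := PySem.Chars.findFrom cs ['/', '*'] (m : Int) none with hcmdef
          set q1 := PySem.Chars.findFrom cs ['\''] (m : Int) none with hq1def
          set q2 := PySem.Chars.findFrom cs ['"'] (m : Int) none with hq2def
          have hbgt : b = -1 ∨ (m : Int) < b :=
            pv_findFrom_gt cs ['{'] m hm (pv_no1 cs m hm '{'
              (by rcases hqt with h | h <;> rw [h] <;> decide))
          have hcmgt : cm = -1 ∨ (m : Int) < cm :=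
            pv_findFrom_gt cs ['/', '*'] m hm hcom
          have hqsel : (if q2 = -1 ∨ (q1 ≠ -1 ∧ q1 < q2) then q1 else q2) = (m : Int) := by
            rcases hqt with h | h
            · have hq1m : q1 = (m : Int) := pv_yes1 cs m hm '\'' h
              have hq2gt : q2 = -1 ∨ (m : Int) < q2 :=
                pv_findFrom_gt cs ['"'] m hm (pv_no1 cs m hm '"' (by rw [h]; decide))
              rcases hq2gt with h2 | h2
              · rw [if_pos (Or.inl h2)]; exact hq1m
              · rw [if_pos (Or.inr ⟨by omega, by omega⟩)]; exact hq1m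
            · have hq2m : q2 = (m : Int) := pv_yes1 cs m hm '"' h
              have hq1gt : q1 = -1 ∨ (m : Int) < q1 :=
                pv_findFrom_gt cs ['\''] m hm (pv_no1 cs m hm '\'' (by rw [h]; decide))
              rw [if_neg (by
                rintro (h2 | ⟨h2a, h2b⟩)
                · omega
                · rcases hq1gt with h1 | h1 <;> omega)]
              exact hq2m
          rw [hqsel]
          rw [if_neg (by rintro ⟨hb1, -, (hb3 | hb3)⟩ <;> rcases hbgt with h | h <;> omega)]
          rw [if_neg (by rintro ⟨hc1, (hc2 | hc2)⟩ <;> rcases hcmgt with h | h <;> omega)]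
          rw [if_pos (by omega)]
          rcases pvSTR cs m hm hqt with ⟨heq, hlb, hub⟩ | ⟨hA, hB⟩
          · rw [← heq]
            set i' := pvA_skipString cs (m : Int) with hi'
            have hi0 : i' = ((i'.toNat : Nat) : Int) := by omega
            rw [hi0]
            exact ih i'.toNat g' (by omega) (by omega)
          · rw [pvA_out cs f _ hA, hB, pvB_out cs g' _ le_rfl]
        · by_cases hbr : cs[m] = '{'
          · -- an open brace at m: both return m
            conv_lhs => rw [pvA_loop]
            rw [if_pos hjlt, if_neg (fun hAcc => hcom ((pvAcond cs m hm).mp hAcc)),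
                if_neg (by rw [e0]; exact hqt), if_pos (by rw [e0]; exact hbr)]
            conv_rhs => rw [pvB_loop]
            set b := PySem.Chars.findFrom cs ['{'] (m : Int) none with hbdef
            set cm := PySem.Chars.findFrom cs ['/', '*'] (m : Int) none with hcmdef
            set q1 := PySem.Chars.findFrom cs ['\''] (m : Int) none with hq1def
            set q2 := PySem.Chars.findFrom cs ['"'] (m : Int) none with hq2def
            have hbm : b = (m : Int) := pv_yes1 cs m hm '{' hbr
            have hcmgt : cm = -1 ∨ (m : Int) < cm :=
              pv_findFrom_gt cs ['/', '*'] m hm hcom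
            have hq1gt : q1 = -1 ∨ (m : Int) < q1 :=
              pv_findFrom_gt cs ['\''] m hm (pv_no1 cs m hm '\''
                (by rw [hbr]; decide))
            have hq2gt : q2 = -1 ∨ (m : Int) < q2 :=
              pv_findFrom_gt cs ['"'] m hm (pv_no1 cs m hm '"' (by rw [hbr]; decide))
            have hqsel : (if q2 = -1 ∨ (q1 ≠ -1 ∧ q1 < q2) then q1 else q2) = -1 ∨
                (m : Int) < (if q2 = -1 ∨ (q1 ≠ -1 ∧ q1 < q2) then q1 else q2) := by
              split_ifs <;> tauto
            rw [if_pos (by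
              refine ⟨by omega, by rcases hcmgt with h | h <;> omega, ?_⟩
              rcases hqsel with h | h
              · exact Or.inl h
              · exact Or.inr (by omega))]
            exact hbm.symm
          · -- nothing of interest at m: both step to m + 1
            have hc1 : ((m : Int) + 1) = ((m + 1 : Nat) : Int) := by push_cast; ring
            conv_lhs => rw [pvA_loop]
            rw [if_pos hjlt, if_neg (fun hAcc => hcom ((pvAcond cs m hm).mp hAcc)),
                if_neg (by rw [e0]; exact hqt), if_neg (by rw [e0]; exact hbr), hc1]
            rw [pvB_shift cs m hm (pv_no1 cs m hm '{' hbr) hcom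
              (pv_no1 cs m hm '\'' (fun h => hqt (Or.inl h)))
              (pv_no1 cs m hm '"' (fun h => hqt (Or.inr h))) g']
            exact ih (m + 1) (g' + 1) (by omega) (by omega)
    · have hge : (cs.length : Int) ≤ (m : Int) := by exact_mod_cast Nat.le_of_not_lt hm
      rw [pvA_out cs (f + 1) _ hge, pvB_out cs (g' + 1) _ hge]

theorem find_next_open_brace_py_spec : Claim_equal_find_next_open_brace_py := by
  intro s start _hdom hpre
  unfold Spec_find_next_open_brace_py find_next_open_brace_py find_next_open_brace_py_alt
  have h0 : (0 : Int) ≤ start := hpre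
  have hst : start = ((start.toNat : Nat) : Int) := by omega
  rw [hst]
  exact pvMain s.toList (s.toList.length + 1) start.toNat (s.toList.length + 2)
    (by omega) (by omega)
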